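-- pv_equiv track=rewrite | github.com/phoughton/cribbage_scorer | cribbage_scorer.py | play_score_multiples
-- ===== SOURCE A (Python) =====
-- def play_score_multiples(card_nums):
--     for run_length in range(4, 1, -1):
--         if len(card_nums) >= 4:
--             if card_nums[-1] == card_nums[-2] == card_nums[-3] == card_nums[-4]:
--                 return 12, "4 of a kind (12pts)"
--         if len(card_nums) >= 3:
--             if card_nums[-1] == card_nums[-2] == card_nums[-3]:
--                 return 6, "3 of a kind (6pts)"
--         if len(card_nums) >= 2:
--             if card_nums[-1] == card_nums[-2]:
--                 return 2, "2 of a kind (2pts)"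
--         return 0, ""
-- ===== SOURCE B (Python) =====
-- def play_score_multiples(card_nums):
--     if len(card_nums) < 2:
--         return 0, ""
--     rev = card_nums[::-1]
--     last = rev[0]
--     run = 0
--     for v in rev:
--         if v != last:
--             break
--         run += 1
--     if run >= 4:
--         return 12, "4 of a kind (12pts)"
--     if run == 3:
--         return 6, "3 of a kind (6pts)"
--     if run == 2:
--         return 2, "2 of a kind (2pts)"
--     return 0, ""
-- ===== Notes on version B (the rewrite author's own statement) =====
-- stated objective: simpler
-- what changed: Replaces the dead for-loop with chained negative-index equality tests by a single backward run-count over the reversed list followed by a run-length-to-score lookup.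
import Mathlib
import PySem

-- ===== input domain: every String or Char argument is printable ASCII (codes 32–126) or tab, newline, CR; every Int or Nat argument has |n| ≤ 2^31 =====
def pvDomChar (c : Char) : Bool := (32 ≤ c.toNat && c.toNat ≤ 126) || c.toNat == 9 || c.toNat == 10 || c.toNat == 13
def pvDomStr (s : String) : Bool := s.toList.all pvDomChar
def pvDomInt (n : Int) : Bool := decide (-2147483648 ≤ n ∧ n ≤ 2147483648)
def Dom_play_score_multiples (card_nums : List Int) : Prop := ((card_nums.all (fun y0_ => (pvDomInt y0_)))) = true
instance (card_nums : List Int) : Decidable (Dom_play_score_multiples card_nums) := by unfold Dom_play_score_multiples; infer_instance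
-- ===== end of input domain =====

-- B replaces A's dead loop + chained negative-index tests by one backward run count
-- over the reversed list and a run-length lookup (objective: simpler).

-- ===== PORT A =====
-- The loop body returns on every path, so only the first iteration of
-- range(4, 1, -1) runs; the [] case (falling off the loop) is unreachable
-- since range(4,1,-1) = [4,3] is a nonempty literal.
def pvALoop (cs : List Int) : List Int → Int × String
  | [] => (0, "")
  | _ :: _ =>
    if 4 ≤ cs.length ∧
        (PySem.List.pyGet? cs (-1) = PySem.List.pyGet? cs (-2) ∧
         PySem.List.pyGet? cs (-2) = PySem.List.pyGet? cs (-3) ∧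
         PySem.List.pyGet? cs (-3) = PySem.List.pyGet? cs (-4)) then
      (12, "4 of a kind (12pts)")
    else if 3 ≤ cs.length ∧
        (PySem.List.pyGet? cs (-1) = PySem.List.pyGet? cs (-2) ∧
         PySem.List.pyGet? cs (-2) = PySem.List.pyGet? cs (-3)) then
      (6, "3 of a kind (6pts)")
    else if 2 ≤ cs.length ∧
        PySem.List.pyGet? cs (-1) = PySem.List.pyGet? cs (-2) then
      (2, "2 of a kind (2pts)")
    else (0, "")

def play_score_multiples (card_nums : List Int) : Int × String :=
  pvALoop card_nums (PySem.List.pyRange 4 1 (-1))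

-- ===== PORT B =====
-- length of the initial run of `last` (the for-loop with break in Source B)
def pvRunLen (last : Int) : List Int → Nat
  | [] => 0
  | v :: t => if v = last then pvRunLen last t + 1 else 0

def play_score_multiples_alt (card_nums : List Int) : Int × String :=
  if card_nums.length < 2 then (0, "")
  else
    let rev := (PySem.List.slice? card_nums none none (-1)).getD []   -- card_nums[::-1]; step ≠ 0, so slice? = some
    let last := rev.headD 0
    let run := pvRunLen last rev
    if 4 ≤ run then (12, "4 of a kind (12pts)")
    else if run = 3 then (6, "3 of a kind (6pts)")
    else if run = 2 then (2, "2 of a kind (2pts)")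
    else (0, "")

-- ===== PRECONDITION & SPEC =====
def Spec_play_score_multiples (card_nums : List Int) (out : Int × String) : Prop := out = play_score_multiples_alt card_nums
instance (card_nums : List Int) (out : Int × String) : Decidable (Spec_play_score_multiples card_nums out) := by unfold Spec_play_score_multiples; infer_instance

-- ===== CLAIM (what is proved, stated in full; the proofs are below) =====
def Claim_equal_play_score_multiples : Prop := ∀ (card_nums : List Int), Dom_play_score_multiples card_nums → Spec_play_score_multiples card_nums (play_score_multiples card_nums)

-- ===== LEMMAS AND PROOFS =====

-- negative indexing from the end through the reverse
theorem gidx (rs : List Int) (k : Nat) (h1 : 0 < k) (h2 : k ≤ rs.length) :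
    PySem.List.pyGet? rs.reverse (-(k : Int)) = rs[k - 1]? := by
  rw [PySem.List.pyGet?_neg_natCast _ _ (by exact_mod_cast h1) (by simpa using (by exact_mod_cast h2 : (k : Int) ≤ rs.length))]
  simp only [List.length_reverse]
  rw [List.getElem?_reverse (by omega)]
  congr 1
  omega

theorem hrange_lit : PySem.List.pyRange 4 1 (-1) = [4, 3, 2] := by decide

theorem main_rev (rs : List Int) :
    play_score_multiples rs.reverse = play_score_multiples_alt rs.reverse := by
  simp only [play_score_multiples, play_score_multiples_alt, hrange_lit,
    PySem.List.slice?_none_none_neg_one, Option.getD_some, List.reverse_reverse]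
  match rs with
  | [] => decide
  | [a] => simp [pvALoop]
  | a :: b :: t =>
    by_cases hab : a = b
    · subst hab
      match t with
      | [] =>
        have h1 : PySem.List.pyGet? [a, a].reverse (-1) = some a := by
          simpa using gidx [a, a] 1 (by omega) (by simp)
        have h2 : PySem.List.pyGet? [a, a].reverse (-2) = some a := by
          simpa using gidx [a, a] 2 (by omega) (by simp)
        simp at h1 h2
        simp [pvALoop, pvRunLen, h1, h2]
      | c :: u =>
        by_cases hac : a = c
        · subst hac
          match u with
          | [] =>
            have h1 : PySem.List.pyGet? [a, a, a].reverse (-1) = some a := by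
              simpa using gidx [a, a, a] 1 (by omega) (by simp)
            have h2 : PySem.List.pyGet? [a, a, a].reverse (-2) = some a := by
              simpa using gidx [a, a, a] 2 (by omega) (by simp)
            have h3 : PySem.List.pyGet? [a, a, a].reverse (-3) = some a := by
              simpa using gidx [a, a, a] 3 (by omega) (by simp)
            simp at h1 h2 h3
            simp [pvALoop, pvRunLen, h1, h2, h3]
          | d :: v =>
            have h1 : PySem.List.pyGet? (a :: a :: a :: d :: v).reverse (-1) = some a := by
              simpa using gidx (a :: a :: a :: d :: v) 1 (by omega) (by simp)
            have h2 : PySem.List.pyGet? (a :: a :: a :: d :: v).reverse (-2) = some a := by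
              simpa using gidx (a :: a :: a :: d :: v) 2 (by omega) (by simp)
            have h3 : PySem.List.pyGet? (a :: a :: a :: d :: v).reverse (-3) = some a := by
              simpa using gidx (a :: a :: a :: d :: v) 3 (by omega) (by simp)
            have h4 : PySem.List.pyGet? (a :: a :: a :: d :: v).reverse (-4) = some d := by
              simpa using gidx (a :: a :: a :: d :: v) 4 (by omega) (by simp)
            simp at h1 h2 h3 h4
            by_cases had : a = d
            · subst had
              simp [pvALoop, pvRunLen, h1, h2, h3, h4]
            · simp [pvALoop, pvRunLen, h1, h2, h3, h4, had, Ne.symm had]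
        · have h1 : PySem.List.pyGet? (a :: a :: c :: u).reverse (-1) = some a := by
            simpa using gidx (a :: a :: c :: u) 1 (by omega) (by simp)
          have h2 : PySem.List.pyGet? (a :: a :: c :: u).reverse (-2) = some a := by
            simpa using gidx (a :: a :: c :: u) 2 (by omega) (by simp)
          have h3 : PySem.List.pyGet? (a :: a :: c :: u).reverse (-3) = some c := by
            simpa using gidx (a :: a :: c :: u) 3 (by omega) (by simp)
          simp at h1 h2 h3
          simp [pvALoop, pvRunLen, h1, h2, h3, hac, Ne.symm hac]
    · have h1 : PySem.List.pyGet? (a :: b :: t).reverse (-1) = some a := by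
        simpa using gidx (a :: b :: t) 1 (by omega) (by simp)
      have h2 : PySem.List.pyGet? (a :: b :: t).reverse (-2) = some b := by
        simpa using gidx (a :: b :: t) 2 (by omega) (by simp)
      simp at h1 h2
      simp [pvALoop, pvRunLen, h1, h2, hab, Ne.symm hab]

-- ===== VERDICT (by name: the statement is the Claim_ definition above) =====
theorem play_score_multiples_spec : Claim_equal_play_score_multiples := by
  intro cs _
  show _ = _
  rw [← List.reverse_reverse cs]
  exact main_rev cs.reverse
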